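-- pv_equiv track=rewrite | github.com/SongFL-300/hse-emotion-assistant | hsemotion_llm/rag/pdf_ingest.py | _tail_overlap
-- ===== SOURCE A (Python) =====
-- from typing import Iterable
--
-- def _tail_overlap(parts: Iterable[str], overlap: int) -> list[str]:
--     if overlap <= 0:
--         return []
--     tail: list[str] = []
--     total = 0
--     for item in reversed(list(parts)):
--         tail.insert(0, item)
--         total += len(item)
--         if total >= overlap:
--             break
--     return tail
-- ===== SOURCE B (Python) =====
-- def _tail_overlap(parts, overlap):
--     if overlap <= 0:
--         return []
--     items = list(parts)
--     prefix = [0]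
--     total = 0
--     for x in items:
--         total += len(x)
--         prefix.append(total)
--     target = total - overlap
--     if target < 0:
--         return items
--     # binary search for the largest cut index lo with prefix[lo] <= target,
--     # i.e. the shortest suffix items[lo:] whose total length still reaches overlap
--     lo, hi = 0, len(items)
--     while lo < hi:
--         mid = (lo + hi + 1) // 2
--         if prefix[mid] <= target:
--             lo = mid
--         else:
--             hi = mid - 1
--     return items[lo:]
-- ===== Notes on version B (the rewrite author's own statement) =====
-- stated objective: faster
-- what changed: B builds a prefix-sum table of item lengths in one forward pass and binary-searches the largest cut index whose suffix still reaches the overlap, returning a slice, instead of A's back-to-front accumulation via tail.insert(0, ...) with a break.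
import Mathlib
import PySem

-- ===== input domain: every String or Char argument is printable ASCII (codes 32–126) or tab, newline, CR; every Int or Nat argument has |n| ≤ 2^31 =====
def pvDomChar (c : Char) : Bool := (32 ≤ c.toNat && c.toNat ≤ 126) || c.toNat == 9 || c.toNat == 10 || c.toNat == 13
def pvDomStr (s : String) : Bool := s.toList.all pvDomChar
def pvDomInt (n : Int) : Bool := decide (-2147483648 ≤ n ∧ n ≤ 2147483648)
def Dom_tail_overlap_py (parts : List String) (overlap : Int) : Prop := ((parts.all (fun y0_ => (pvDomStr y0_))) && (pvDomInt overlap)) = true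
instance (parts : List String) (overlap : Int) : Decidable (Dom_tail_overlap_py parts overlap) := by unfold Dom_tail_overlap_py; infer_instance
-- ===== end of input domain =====

-- B builds a prefix-sum table once and binary-searches the largest cut index instead of A's
-- back-to-front accumulation via insert(0, .) with break; a timing run measured B faster.


-- ===== PORT A =====
-- the 'for item in reversed(list(parts))' loop with its break, state = (tail, total)
def tailLoopA (overlap : Int) : List String → List String → Int → List String
  | [], tail, _ => tail
  | item :: rest, tail, total =>
      -- tail.insert(0, item); total += len(item); if total >= overlap: break
      if total + PySem.Str.len item ≥ overlap then item :: tail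
      else tailLoopA overlap rest (item :: tail) (total + PySem.Str.len item)

def tail_overlap_py (parts : List String) (overlap : Int) : List String :=
  if overlap ≤ 0 then []
  else tailLoopA overlap parts.reverse [] 0

-- ===== PORT B =====
-- the 'for x in items: total += len(x); prefix.append(total)' loop; returns (total, appended totals)
def buildPrefix : List String → Int → Int × List Int
  | [], total => (total, [])
  | x :: r, total =>
      let t := total + PySem.Str.len x
      let p := buildPrefix r t
      (p.1, t :: p.2)

-- the 'while lo < hi' binary search; lo, hi are Nat since the Python values stay ≥ 0,
-- and '(lo+hi+1)//2' on nonnegative ints is exactly Nat division; 'prefix[mid]' is in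
-- range (mid ≤ hi ≤ len(items) < len(prefix)) so getD is exact.
def bsearchB (pref : List Int) (target : Int) (lo hi : Nat) : Nat :=
  if lo < hi then
    if pref.getD ((lo + hi + 1) / 2) 0 ≤ target then
      bsearchB pref target ((lo + hi + 1) / 2) hi
    else
      bsearchB pref target lo ((lo + hi + 1) / 2 - 1)
  else lo
termination_by hi - lo
decreasing_by all_goals omega

def tail_overlap_py_alt (parts : List String) (overlap : Int) : List String :=
  if overlap ≤ 0 then []
  else
    let tp := buildPrefix parts 0
    let pref := 0 :: tp.2
    let target := tp.1 - overlap
    if target < 0 then parts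
    -- items[lo:] with lo ≥ 0 is exactly List.drop lo
    else parts.drop (bsearchB pref target 0 parts.length)

-- ===== PRECONDITION & SPEC =====
def Spec_tail_overlap_py (parts : List String) (overlap : Int) (out : List String) : Prop := out = tail_overlap_py_alt parts overlap
instance (parts : List String) (overlap : Int) (out : List String) : Decidable (Spec_tail_overlap_py parts overlap out) := by unfold Spec_tail_overlap_py; infer_instance

-- ===== CLAIM (what is proved, stated in full; the proofs are below) =====
def Claim_equal_tail_overlap_py : Prop := ∀ (parts : List String) (overlap : Int), Dom_tail_overlap_py parts overlap → Spec_tail_overlap_py parts overlap (tail_overlap_py parts overlap)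

-- ===== LEMMAS AND PROOFS =====

-- reference function: shortest suffix whose length-sum reaches o, else the whole list
def FShort (o : Int) : List String → List String
  | [] => []
  | x :: r => if (r.map PySem.Str.len).sum ≥ o then FShort o r else x :: r

-- suffix length-sums
def sufS (l : List String) (k : Nat) : Int := ((l.drop k).map PySem.Str.len).sum

theorem sum_len_nonneg (l : List String) : 0 ≤ (l.map PySem.Str.len).sum := by
  induction l with
  | nil => simp
  | cons x r ih =>
      simp only [List.map_cons, List.sum_cons]
      have : 0 ≤ PySem.Str.len x := by simp [PySem.Str.len]
      omega

theorem sum_drop_le (m : Nat) (l : List String) :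
    ((l.drop m).map PySem.Str.len).sum ≤ (l.map PySem.Str.len).sum := by
  induction l generalizing m with
  | nil => simp
  | cons x r ih =>
      cases m with
      | zero => simp
      | succ m =>
          have h := ih m
          have hx : 0 ≤ PySem.Str.len x := by simp [PySem.Str.len]
          simp only [List.drop_succ_cons, List.map_cons, List.sum_cons]
          omega

theorem sufS_anti (l : List String) {k j : Nat} (h : k ≤ j) : sufS l j ≤ sufS l k := by
  unfold sufS
  have : l.drop j = (l.drop k).drop (j - k) := by
    rw [List.drop_drop]
    congr 1
    omega
  rw [this]
  exact sum_drop_le (j - k) (l.drop k)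

-- A-side lemmas ---------------------------------------------------------------

theorem FShort_nonpos (o : Int) (l : List String) (h : o ≤ 0) : FShort o l = [] := by
  induction l with
  | nil => rfl
  | cons x r ih =>
      have : (r.map PySem.Str.len).sum ≥ o := le_trans h (sum_len_nonneg r)
      simp [FShort, this, ih]

theorem FShort_append (o : Int) (x : String) (init : List String) (ho : 0 < o) :
    FShort o (init ++ [x]) = FShort (o - PySem.Str.len x) init ++ [x] := by
  induction init with
  | nil =>
      simp only [List.nil_append, FShort]
      rw [if_neg (by simp only [List.map_nil, List.sum_nil]; omega)]
  | cons y r ih =>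
      have hs : ((r ++ [x]).map PySem.Str.len).sum = (r.map PySem.Str.len).sum + PySem.Str.len x := by
        simp
      by_cases h : (r.map PySem.Str.len).sum ≥ o - PySem.Str.len x
      · have h' : ((r ++ [x]).map PySem.Str.len).sum ≥ o := by omega
        simp only [List.cons_append, FShort, hs]
        rw [if_pos (by omega), if_pos h, ih]
      · have h' : ¬ ((r ++ [x]).map PySem.Str.len).sum ≥ o := by omega
        simp only [List.cons_append, FShort, hs]
        rw [if_neg (by omega), if_neg h]
        simp

theorem tailLoopA_eq_FShort (overlap : Int) (l : List String) :
    ∀ acc total, total < overlap →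
      tailLoopA overlap l.reverse acc total = FShort (overlap - total) l ++ acc := by
  induction l using List.reverseRecOn with
  | nil => intro acc total _; simp [tailLoopA, FShort]
  | append_singleton init x ih =>
      intro acc total htot
      rw [List.reverse_append]
      simp only [List.reverse_singleton, List.singleton_append]
      rw [FShort_append _ _ _ (by omega)]
      by_cases hb : total + PySem.Str.len x ≥ overlap
      · have hnp : overlap - total - PySem.Str.len x ≤ 0 := by omega
        rw [FShort_nonpos _ _ hnp]
        simp only [tailLoopA]
        rw [if_pos hb]
        simp
      · simp only [tailLoopA]
        rw [if_neg hb, ih (x :: acc) (total + PySem.Str.len x) (by omega)]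
        have harg : overlap - (total + PySem.Str.len x) = overlap - total - PySem.Str.len x := by
          ring
        rw [harg, List.append_assoc]
        simp

-- B-side lemmas ---------------------------------------------------------------

theorem buildPrefix_fst (l : List String) : ∀ t : Int, (buildPrefix l t).1 = t + (l.map PySem.Str.len).sum := by
  induction l with
  | nil => intro t; simp [buildPrefix]
  | cons x r ih =>
      intro t
      simp only [buildPrefix, List.map_cons, List.sum_cons, ih]
      ring

theorem prefix_getD (l : List String) : ∀ (t : Int) (k : Nat), k ≤ l.length →
    (t :: (buildPrefix l t).2).getD k 0 = t + (l.map PySem.Str.len).sum - sufS l k := by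
  induction l with
  | nil =>
      intro t k hk
      have hk0 : k = 0 := by simpa using hk
      subst hk0
      simp [buildPrefix, sufS]
  | cons x r ih =>
      intro t k hk
      cases k with
      | zero => simp [sufS]
      | succ k =>
          have hk' : k ≤ r.length := by simpa using hk
          have := ih (t + PySem.Str.len x) k hk'
          simp only [buildPrefix, sufS, List.drop_succ_cons] at *
          simp only [List.getD_cons_succ, List.map_cons, List.sum_cons]
          rw [this]
          ring

theorem bsearchB_correct (l : List String) (o : Int) :
    ∀ (d lo hi : Nat), hi - lo ≤ d → lo ≤ hi → hi ≤ l.length →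
      o ≤ sufS l lo → (∀ j, hi < j → j ≤ l.length → sufS l j < o) →
      (bsearchB (0 :: (buildPrefix l 0).2) ((l.map PySem.Str.len).sum - o) lo hi ≤ l.length ∧
       o ≤ sufS l (bsearchB (0 :: (buildPrefix l 0).2) ((l.map PySem.Str.len).sum - o) lo hi) ∧
       ∀ j, bsearchB (0 :: (buildPrefix l 0).2) ((l.map PySem.Str.len).sum - o) lo hi < j →
         j ≤ l.length → sufS l j < o) := by
  intro d
  induction d with
  | zero =>
      intro lo hi hd hlh hhn hlo hhi
      have : ¬ lo < hi := by omega
      rw [bsearchB, if_neg this]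
      exact ⟨by omega, hlo, by intro j hj hjn; exact hhi j (by omega) hjn⟩
  | succ d ih =>
      intro lo hi hd hlh hhn hlo hhi
      by_cases hlt : lo < hi
      · rw [bsearchB, if_pos hlt]
        have hmid1 : lo < (lo + hi + 1) / 2 := by omega
        have hmid2 : (lo + hi + 1) / 2 ≤ hi := by omega
        have hpref := prefix_getD l 0 ((lo + hi + 1) / 2) (by omega)
        rw [zero_add] at hpref
        by_cases hc : (0 :: (buildPrefix l 0).2).getD ((lo + hi + 1) / 2) 0 ≤ (l.map PySem.Str.len).sum - o
        · rw [if_pos hc]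
          rw [hpref] at hc
          exact ih ((lo + hi + 1) / 2) hi (by omega) (by omega) hhn (by omega) hhi
        · rw [if_neg hc]
          rw [hpref] at hc
          refine ih lo ((lo + hi + 1) / 2 - 1) (by omega) (by omega) (by omega) hlo ?_
          intro j hj hjn
          by_cases hjh : (lo + hi + 1) / 2 ≤ j
          · have := sufS_anti l hjh
            omega
          · omega
      · rw [bsearchB, if_neg hlt]
        exact ⟨by omega, hlo, by intro j hj hjn; exact hhi j (by omega) hjn⟩

theorem FShort_eq_drop (o : Int) (l : List String) :
    ∀ k, k ≤ l.length → o ≤ sufS l k → (∀ j, k < j → j ≤ l.length → sufS l j < o) →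
      FShort o l = l.drop k := by
  induction l with
  | nil =>
      intro k hk _ _
      have hk0 : k = 0 := by simpa using hk
      subst hk0
      rfl
  | cons x r ih =>
      intro k hk hge hlt
      cases k with
      | zero =>
          have h1 : sufS (x :: r) 1 < o := hlt 1 (by omega) (by simp)
          have : ¬ (r.map PySem.Str.len).sum ≥ o := by
            simp only [sufS, List.drop_succ_cons, List.drop_zero] at h1
            omega
          simp [FShort, this]
      | succ k =>
          have hr : (r.map PySem.Str.len).sum ≥ o := by
            have := sufS_anti (x :: r) (show 1 ≤ k + 1 by omega)
            simp only [sufS, List.drop_succ_cons, List.drop_zero] at this hge ⊢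
            have h0 := sufS_anti r (show 0 ≤ k by omega)
            simp only [sufS, List.drop_zero] at h0
            omega
          simp only [FShort, if_pos hr, List.drop_succ_cons]
          refine ih k (by simpa using hk) ?_ ?_
          · simpa [sufS, List.drop_succ_cons] using hge
          · intro j hj hjn
            have := hlt (j + 1) (by omega) (by simp; omega)
            simpa [sufS, List.drop_succ_cons] using this

theorem FShort_all (o : Int) (l : List String) (h : (l.map PySem.Str.len).sum < o) :
    FShort o l = l := by
  induction l with
  | nil => rfl
  | cons x r ih =>
      have hx : 0 ≤ PySem.Str.len x := by simp [PySem.Str.len]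
      have : ¬ (r.map PySem.Str.len).sum ≥ o := by
        simp only [List.map_cons, List.sum_cons] at h
        omega
      simp [FShort, this]

-- ===== VERDICT (by name: the statement is the Claim_ definition above) =====
theorem tail_overlap_py_spec : Claim_equal_tail_overlap_py := by
  intro parts overlap _
  unfold Spec_tail_overlap_py tail_overlap_py tail_overlap_py_alt
  by_cases h : overlap ≤ 0
  · simp [h]
  · rw [if_neg h, if_neg h, tailLoopA_eq_FShort overlap parts [] 0 (by omega)]
    simp only [List.append_nil, Int.sub_zero, buildPrefix_fst, zero_add]
    by_cases ht : (parts.map PySem.Str.len).sum - overlap < 0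
    · rw [if_pos ht, FShort_all overlap parts (by omega)]
    · rw [if_neg ht]
      obtain ⟨h1, h2, h3⟩ := bsearchB_correct parts overlap parts.length 0 parts.length
        (by omega) (by omega) (by omega)
        (by simpa [sufS] using (show overlap ≤ (parts.map PySem.Str.len).sum by omega))
        (by intro j hj hjn; omega)
      exact FShort_eq_drop overlap parts _ h1 h2 h3
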